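-- pv_equiv track=rewrite | github.com/rkdalsdn94/algoalgo | solved_ac/Silver_2/Choose_your_own_path_16021.py | solve_adventure_book
-- ===== SOURCE A (Python) =====
-- from collections import deque
--
-- def solve_adventure_book(N, graph):
--     # 모든 페이지 도달 가능한지 확인
--     def check_reachable():
--         visited = set()
--         queue = deque([1])  # 1페이지부터 시작
--         visited.add(1)
--
--         while queue:
--             current = queue.popleft()
--             for next_page in graph[current]:
--                 if next_page not in visited:
--                     visited.add(next_page)
--                     queue.append(next_page)
--
--         return len(visited) == N
--
--     # 가장 짧은 경로 찾기
--     def find_shortest_path():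
--         queue = deque([(1, 1)])  # (페이지, 경로 길이)
--         visited = {1}
--
--         while queue:
--             current, length = queue.popleft()
--
--             # 현재 페이지가 끝 페이지인 경우
--             if len(graph[current]) == 0:
--                 return length
--
--             for next_page in graph[current]:
--                 if next_page not in visited:
--                     visited.add(next_page)
--                     queue.append((next_page, length + 1))
--
--     can_reach_all = check_reachable()
--     shortest_path = find_shortest_path()
--
--     return "Y" if can_reach_all else "N", shortest_path
-- ===== SOURCE B (Python) =====
-- from collections import deque
--
-- def solve_adventure_book(N, graph):
--     # Single BFS from page 1: visited gives reachability, and the first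
--     # dequeued terminal page (empty successor list) gives the shortest path
--     # length, since BFS dequeues in non-decreasing distance order.
--     visited = {1}
--     queue = deque([(1, 1)])
--     shortest = None
--     while queue:
--         node, length = queue.popleft()
--         if shortest is None and len(graph[node]) == 0:
--             shortest = length
--         for nxt in graph[node]:
--             if nxt not in visited:
--                 visited.add(nxt)
--                 queue.append((nxt, length + 1))
--     return ("Y" if len(visited) == N else "N", shortest)
-- ===== Notes on version B (the rewrite author's own statement) =====
-- stated objective: simpler
-- what changed: B replaces A's two separate BFS passes (one for reachability, one restarted from scratch for the first terminal) by a single BFS from page 1 that tracks the visited set and records the length of the first dequeued terminal page.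
-- outside the precondition, e.g. on solve_adventure_book(1, {1: [1]}): A returns ('Y', None), B returns ('Y', None)
import Mathlib
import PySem

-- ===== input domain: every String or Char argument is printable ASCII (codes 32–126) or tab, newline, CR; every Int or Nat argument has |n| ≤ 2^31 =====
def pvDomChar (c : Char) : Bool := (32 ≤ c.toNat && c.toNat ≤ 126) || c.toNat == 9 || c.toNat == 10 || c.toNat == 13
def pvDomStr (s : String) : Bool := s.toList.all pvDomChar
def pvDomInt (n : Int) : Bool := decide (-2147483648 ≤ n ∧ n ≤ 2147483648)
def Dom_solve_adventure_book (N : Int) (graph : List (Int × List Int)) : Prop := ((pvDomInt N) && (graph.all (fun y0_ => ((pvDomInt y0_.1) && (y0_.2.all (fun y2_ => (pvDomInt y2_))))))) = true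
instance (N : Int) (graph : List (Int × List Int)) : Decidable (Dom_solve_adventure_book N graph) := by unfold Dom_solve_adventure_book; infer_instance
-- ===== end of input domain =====

-- B merges A's two BFS passes into one BFS that tracks both the visited set and
-- the first dequeued terminal's length (objective: simpler).


-- Python's graph[n]; total form (default []) — exact under Pre_, which excludes KeyError inputs.
def pvSucc (graph : List (Int × List Int)) (n : Int) : List Int := (graph.lookup n).getD []

-- totality fuel for the BFS loops: one unit per possible dequeue (1 initial enqueue + at most
-- one enqueue per listed edge); under Pre_ the queue always empties before the fuel does.
def pvFuel (graph : List (Int × List Int)) : Nat := 1 + (graph.map (fun p => p.2.length)).sum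

-- ===== PORT A =====
-- check_reachable's while loop: queue of pages, visited set
def pvCheckLoop (graph : List (Int × List Int)) : Nat → List Int → PySem.Set Int → PySem.Set Int
  | 0, _, visited => visited
  | _ + 1, [], visited => visited
  | fuel + 1, current :: queue, visited =>
      let st := (pvSucc graph current).foldl
        (fun (st : PySem.Set Int × List Int) next_page =>
          if next_page ∈ st.1 then st else (PySem.Set.add st.1 next_page, st.2 ++ [next_page]))
        (visited, queue)
      pvCheckLoop graph fuel st.2 st.1

-- find_shortest_path's while loop: queue of (page, length); returns at the first terminal
def pvFindLoop (graph : List (Int × List Int)) : Nat → List (Int × Int) → PySem.Set Int → Option Int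
  | 0, _, _ => none
  | _ + 1, [], _ => none
  | fuel + 1, (current, length) :: queue, visited =>
      if (pvSucc graph current).length = 0 then some length
      else
        let st := (pvSucc graph current).foldl
          (fun (st : PySem.Set Int × List (Int × Int)) next_page =>
            if next_page ∈ st.1 then st else (PySem.Set.add st.1 next_page, st.2 ++ [(next_page, length + 1)]))
          (visited, queue)
        pvFindLoop graph fuel st.2 st.1

def solve_adventure_book (N : Int) (graph : List (Int × List Int)) : String × Int :=
  let can_reach_all := PySem.Set.len (pvCheckLoop graph (pvFuel graph) [1] (PySem.Set.add PySem.Set.empty 1)) = N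
  let shortest_path := pvFindLoop graph (pvFuel graph) [(1, 1)] (PySem.Set.ofList [1])
  ((if can_reach_all then "Y" else "N"), shortest_path.getD 0)  -- None excluded by Pre_

-- ===== PORT B =====
-- the single BFS loop of Source B: visited set and first-terminal length together
def pvAltLoop (graph : List (Int × List Int)) : Nat → List (Int × Int) → PySem.Set Int → Option Int → PySem.Set Int × Option Int
  | 0, _, visited, shortest => (visited, shortest)
  | _ + 1, [], visited, shortest => (visited, shortest)
  | fuel + 1, (node, length) :: queue, visited, shortest =>
      let shortest' := if shortest = none ∧ (pvSucc graph node).length = 0 then some length else shortest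
      let st := (pvSucc graph node).foldl
        (fun (st : PySem.Set Int × List (Int × Int)) nxt =>
          if nxt ∈ st.1 then st else (PySem.Set.add st.1 nxt, st.2 ++ [(nxt, length + 1)]))
        (visited, queue)
      pvAltLoop graph fuel st.2 st.1 shortest'

def solve_adventure_book_alt (N : Int) (graph : List (Int × List Int)) : String × Int :=
  let res := pvAltLoop graph (pvFuel graph) [(1, 1)] (PySem.Set.ofList [1]) none
  ((if PySem.Set.len res.1 = N then "Y" else "N"), res.2.getD 0)  -- None excluded by Pre_

-- ===== PRECONDITION & SPEC =====
-- pages reachable from page 1 in at most graph.length steps (all of them, since successors are keys under Pre_)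
-- (helper for Pre_ only)
def pvReach (graph : List (Int × List Int)) : List Int :=
  (fun S => PySem.List.dedup (S ++ S.flatMap (fun n => (graph.lookup n).getD [])))^[graph.length] [1]

-- Pre_ excludes inputs where Python A raises KeyError (a page reachable from page 1 is missing
-- from graph) and inputs where no terminal page is reachable from page 1, on which A returns
-- None in the Int slot (not a value of the declared return type).
def Pre_solve_adventure_book (N : Int) (graph : List (Int × List Int)) : Prop :=
  (∀ t ∈ pvReach graph, (graph.lookup t).isSome = true) ∧
  (∃ t ∈ pvReach graph, (graph.lookup t).getD [] = [])
instance (N : Int) (graph : List (Int × List Int)) : Decidable (Pre_solve_adventure_book N graph) := by unfold Pre_solve_adventure_book; infer_instance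

def pvWitness_solve_adventure_book : Int × (List (Int × List Int)) := (2, [(1, [2]), (2, [])])

def Spec_solve_adventure_book (N : Int) (graph : List (Int × List Int)) (out : String × Int) : Prop := out = solve_adventure_book_alt N graph
instance (N : Int) (graph : List (Int × List Int)) (out : String × Int) : Decidable (Spec_solve_adventure_book N graph out) := by unfold Spec_solve_adventure_book; infer_instance

-- ===== CLAIM (what is proved, stated in full; the proofs are below) =====
def Claim_equal_solve_adventure_book : Prop := ∀ (N : Int) (graph : List (Int × List Int)), Dom_solve_adventure_book N graph → Pre_solve_adventure_book N graph → Spec_solve_adventure_book N graph (solve_adventure_book N graph)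

-- ===== LEMMAS AND PROOFS =====

-- the inner for-loops of B's BFS and of A's check BFS advance in lockstep:
-- same visited set, and B's queue of pairs projects onto A's queue of pages
theorem pv_fold_rel (graph : List (Int × List Int)) (succs : List Int) (l : Int) :
    ∀ (v : PySem.Set Int) (qp : List (Int × Int)),
    (succs.foldl
      (fun (st : PySem.Set Int × List (Int × Int)) nxt =>
        if nxt ∈ st.1 then st else (PySem.Set.add st.1 nxt, st.2 ++ [(nxt, l + 1)]))
      (v, qp)).1
      = (succs.foldl
          (fun (st : PySem.Set Int × List Int) next_page =>
            if next_page ∈ st.1 then st else (PySem.Set.add st.1 next_page, st.2 ++ [next_page]))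
          (v, qp.map Prod.fst)).1
    ∧ (succs.foldl
      (fun (st : PySem.Set Int × List (Int × Int)) nxt =>
        if nxt ∈ st.1 then st else (PySem.Set.add st.1 nxt, st.2 ++ [(nxt, l + 1)]))
      (v, qp)).2.map Prod.fst
      = (succs.foldl
          (fun (st : PySem.Set Int × List Int) next_page =>
            if next_page ∈ st.1 then st else (PySem.Set.add st.1 next_page, st.2 ++ [next_page]))
          (v, qp.map Prod.fst)).2 := by
  induction succs with
  | nil => intro v qp; exact ⟨rfl, rfl⟩
  | cons n ns ih =>
      intro v qp
      by_cases h : n ∈ v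
      · simpa [h] using ih v qp
      · simpa [h] using ih (PySem.Set.add v n) (qp ++ [(n, l + 1)])

-- B's visited set is exactly the one A's check BFS computes
theorem pv_alt_fst (graph : List (Int × List Int)) :
    ∀ (fuel : Nat) (q : List (Int × Int)) (v : PySem.Set Int) (s : Option Int),
    (pvAltLoop graph fuel q v s).1 = pvCheckLoop graph fuel (q.map Prod.fst) v := by
  intro fuel
  induction fuel with
  | zero => intro q v s; rfl
  | succ f ih =>
      intro q v s
      match q with
      | [] => rfl
      | (n, l) :: q =>
          simp only [pvAltLoop, pvCheckLoop, List.map_cons]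
          rw [ih]
          rw [(pv_fold_rel graph (pvSucc graph n) l v q).1,
              (pv_fold_rel graph (pvSucc graph n) l v q).2]

-- once B has recorded a shortest length it never changes
theorem pv_alt_absorb (graph : List (Int × List Int)) :
    ∀ (fuel : Nat) (q : List (Int × Int)) (v : PySem.Set Int) (s : Int),
    (pvAltLoop graph fuel q v (some s)).2 = some s := by
  intro fuel
  induction fuel with
  | zero => intro q v s; rfl
  | succ f ih =>
      intro q v s
      match q with
      | [] => rfl
      | (n, l) :: q => simp only [pvAltLoop]; simp; rw [ih]

-- B's recorded length is exactly what A's find_shortest_path BFS returns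
theorem pv_alt_snd (graph : List (Int × List Int)) :
    ∀ (fuel : Nat) (q : List (Int × Int)) (v : PySem.Set Int),
    (pvAltLoop graph fuel q v none).2 = pvFindLoop graph fuel q v := by
  intro fuel
  induction fuel with
  | zero => intro q v; rfl
  | succ f ih =>
      intro q v
      match q with
      | [] => rfl
      | (n, l) :: q =>
          by_cases h : (pvSucc graph n).length = 0
          · have hnil : pvSucc graph n = [] := List.length_eq_zero_iff.mp h
            simp only [pvAltLoop, pvFindLoop, hnil]
            simpa using pv_alt_absorb graph f q v l
          · simp only [pvAltLoop, pvFindLoop]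
            rw [if_neg (fun hc => h hc.2), if_neg h]
            exact ih _ _

-- ===== VERDICT (by name: the statement is the Claim_ definition above) =====
theorem solve_adventure_book_spec : Claim_equal_solve_adventure_book := by
  intro N graph _hdom _hpre
  unfold Spec_solve_adventure_book solve_adventure_book solve_adventure_book_alt
  have h1 : (pvAltLoop graph (pvFuel graph) [(1, 1)] (PySem.Set.ofList [1]) none).1
      = pvCheckLoop graph (pvFuel graph) [1] (PySem.Set.add PySem.Set.empty 1) := by
    simpa [PySem.Set.ofList, PySem.Set.add, PySem.Set.empty] using
      pv_alt_fst graph (pvFuel graph) [(1, 1)] (PySem.Set.ofList [1]) none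
  have h2 : (pvAltLoop graph (pvFuel graph) [(1, 1)] (PySem.Set.ofList [1]) none).2
      = pvFindLoop graph (pvFuel graph) [(1, 1)] (PySem.Set.ofList [1]) :=
    pv_alt_snd graph (pvFuel graph) [(1, 1)] (PySem.Set.ofList [1])
  simp [h1, h2]
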